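-- pv_equiv track=rewrite | github.com/KyoungSoo1996/python-coding-practice | python project/programers/nightOvertime.py | solution
-- ===== SOURCE A (Python) =====
-- def solution(n, works):
--     answer = 0
--     #시간이 할일보다 많거나 같은지 계산
--     if sum(works) <= n:
--         return 0
--     #할일 계산
--     while n > 0 :
--         maxTime = 0
--         maxNum = 0
--         for work in range(len(works)):
--             if maxTime < works[work]:
--                 maxTime = works[work]
--                 maxNum = work
--         works[maxNum] -= 1
--         n -= 1
--     #야근 지수 계산
--     for work in works:
--         answer += work**2
--     return answer
-- ===== SOURCE B (Python) =====
-- def solution(n, works):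
--     if sum(works) <= n:
--         return 0
--     base = sum(w * w for w in works if w <= 0)
--     pos = [w for w in works if w > 0]
--     while n > 0:
--         m = max(pos)
--         k = pos.count(m)
--         lower = [w for w in pos if w < m]
--         nxt = max(lower) if lower else 0
--         batch = k * (m - nxt)
--         if batch <= n:
--             n -= batch
--             pos = lower + [nxt] * k
--         else:
--             q, r = divmod(n, k)
--             return base + sum(w * w for w in lower) + r * (m - q - 1) ** 2 + (k - r) * (m - q) ** 2
--     return base + sum(w * w for w in pos)
-- ===== Notes on version B (the rewrite author's own statement) =====
-- stated objective: alternative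
-- what changed: A decrements the current maximum one unit at a time (one full argmax scan per unit of n); B separates the nonpositive entries once, then lowers the whole group of equal maxima to the next lower level in one arithmetic batch per round, finishing the last partial level with divmod, so its loop count is independent of n.
import Mathlib
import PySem

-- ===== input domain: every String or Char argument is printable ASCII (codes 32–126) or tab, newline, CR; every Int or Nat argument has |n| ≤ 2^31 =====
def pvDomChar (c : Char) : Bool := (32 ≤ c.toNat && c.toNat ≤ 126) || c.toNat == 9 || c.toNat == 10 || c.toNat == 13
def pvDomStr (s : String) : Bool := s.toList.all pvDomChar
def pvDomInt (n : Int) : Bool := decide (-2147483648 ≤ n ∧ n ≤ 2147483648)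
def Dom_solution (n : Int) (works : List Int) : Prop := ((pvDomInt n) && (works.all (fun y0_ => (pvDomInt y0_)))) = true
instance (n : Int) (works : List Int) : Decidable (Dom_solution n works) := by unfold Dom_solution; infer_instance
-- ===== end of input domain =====

-- B replaces A's one-unit-per-iteration argmax loop by a batched level sweep over groups of equal maxima;
-- equivalence is about the RETURN value only: Python A mutates `works` in place, B does not.

-- ===== PORT A =====
-- the inner `for work in range(len(works))` argmax scan, as structural recursion
-- over the list with the running index (mt = maxTime, mn = maxNum)
def pvArgmax : List Int → Nat → Int → Int → Int × Int
  | [], _, mt, mn => (mt, mn)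
  | w :: ws, i, mt, mn =>
    if mt < w then pvArgmax ws (i + 1) w (i : Int) else pvArgmax ws (i + 1) mt mn

-- one iteration of the while-loop body: `works[maxNum] -= 1`
def pvStep (ws : List Int) : List Int :=
  let p := pvArgmax ws 0 0 0
  match PySem.List.pyGet? ws p.2 with
  | some v => ws.set p.2.toNat (v - 1)   -- p.2 ≥ 0 always, so set at that index is Python's works[maxNum] = v - 1
  | none => ws                           -- Python would raise IndexError (only for works = []); unreachable from `solution`

-- `while n > 0` runs exactly n.toNat iterations (n is decremented once per pass)
def pvALoop : Nat → List Int → List Int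
  | 0, ws => ws
  | t + 1, ws => pvALoop t (pvStep ws)

def solution (n : Int) (works : List Int) : Int :=
  if works.sum ≤ n then 0
  else (pvALoop n.toNat works).foldl (fun a w => a + w ^ 2) 0

-- ===== PORT B =====
def pvSumsq (ws : List Int) : Int := (ws.map (fun w => w * w)).sum

-- the `while n > 0` loop of B; fuel = n.toNat at entry (n drops by batch ≥ 1 per pass, so fuel suffices)
def pvBLoop : Nat → Int → Int → List Int → Int
  | 0, _, base, pos => base + pvSumsq pos
  | f + 1, n, base, pos =>
    if n > 0 then
      match PySem.List.max? pos (fun y => y) with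
      | none => base + pvSumsq pos       -- Python max([]) raises ValueError; unreachable from `solution_alt`
      | some m =>
        let k : Nat := PySem.List.count pos m
        let lower := pos.filter (fun w => decide (w < m))
        let nxt : Int := match PySem.List.max? lower (fun y => y) with | some x => x | none => 0
        let batch : Int := (k : Int) * (m - nxt)
        if batch ≤ n then pvBLoop f (n - batch) base (lower ++ List.replicate k nxt)
        else
          let q := PySem.Int.floordiv n (k : Int)
          let r := PySem.Int.mod n (k : Int)
          base + pvSumsq lower + r * (m - q - 1) ^ 2 + ((k : Int) - r) * (m - q) ^ 2
    else base + pvSumsq pos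

def solution_alt (n : Int) (works : List Int) : Int :=
  if works.sum ≤ n then 0
  else
    pvBLoop n.toNat n
      (pvSumsq (works.filter (fun w => decide (w ≤ 0))))
      (works.filter (fun w => decide (0 < w)))

-- ===== PRECONDITION & SPEC =====
def Spec_solution (n : Int) (works : List Int) (out : Int) : Prop := out = solution_alt n works
instance (n : Int) (works : List Int) (out : Int) : Decidable (Spec_solution n works out) := by unfold Spec_solution; infer_instance

-- ===== CLAIM (what is proved, stated in full; the proofs are below) =====
def Claim_equal_solution : Prop := ∀ (n : Int) (works : List Int), Dom_solution n works → Spec_solution n works (solution n works)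

-- ===== LEMMAS AND PROOFS =====

-- max of the list floored at 0 (A's maxTime) and the positive mass (number of unit decrements available)
def pvMaxL (ws : List Int) : Int := ws.foldl max 0
def pvPossum (ws : List Int) : Int := (ws.map (fun w => max w 0)).sum

-- the common specification: t single decrements of the (floored) maximum, then sum of squares
def pvF : Nat → List Int → Int
  | 0, ws => pvSumsq ws
  | t + 1, ws => pvF t ((pvMaxL ws - 1) :: ws.erase (pvMaxL ws))

theorem pvSumsq_perm {ws ws' : List Int} (h : ws.Perm ws') : pvSumsq ws = pvSumsq ws' := by
  exact (h.map _).sum_eq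

theorem pvSumsq_append (a b : List Int) : pvSumsq (a ++ b) = pvSumsq a + pvSumsq b := by
  simp [pvSumsq]

theorem pvSumsq_replicate (k : Nat) (x : Int) : pvSumsq (List.replicate k x) = (k : Int) * (x * x) := by
  simp [pvSumsq, List.sum_replicate]

theorem pvFoldl_max_init (ws : List Int) (a b : Int) :
    ws.foldl max (max a b) = max a (ws.foldl max b) := by
  induction ws generalizing a b with
  | nil => simp
  | cons w t ih =>
      simp only [List.foldl_cons]
      rw [max_assoc, ih]

theorem pvInit_le_foldl_max (ws : List Int) (a : Int) : a ≤ ws.foldl max a := by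
  induction ws generalizing a with
  | nil => simp
  | cons w t ih => exact le_trans (le_max_left a w) (ih (max a w))

theorem pvLe_foldl_max {w : Int} {ws : List Int} (a : Int) (h : w ∈ ws) : w ≤ ws.foldl max a := by
  induction ws generalizing a with
  | nil => simp at h
  | cons x t ih =>
      rcases List.mem_cons.mp h with rfl | h
      · exact le_trans (le_max_right a w) (pvInit_le_foldl_max t (max a w))
      · exact ih (max a x) h

theorem pvFoldl_max_mem (ws : List Int) (a : Int) : ws.foldl max a = a ∨ ws.foldl max a ∈ ws := by
  induction ws generalizing a with
  | nil => left; rfl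
  | cons w t ih =>
      rcases ih (max a w) with h | h
      · rcases max_choice a w with hm | hm
        · left; rw [List.foldl_cons, h, hm]
        · right; rw [List.foldl_cons, h, hm]; simp
      · right; exact List.mem_cons_of_mem _ h

theorem pvFoldl_max_of_le {ws : List Int} {a : Int} (h : ∀ w ∈ ws, w ≤ a) : ws.foldl max a = a := by
  induction ws generalizing a with
  | nil => rfl
  | cons w t ih =>
      simp only [List.foldl_cons]
      rw [max_eq_left (h w (by simp)), ih]
      intro x hx; exact h x (by simp [hx])

theorem pvMaxL_nonneg (ws : List Int) : 0 ≤ pvMaxL ws := by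
  exact pvInit_le_foldl_max ws 0

theorem pvMaxL_perm {ws ws' : List Int} (h : ws.Perm ws') : pvMaxL ws = pvMaxL ws' := by
  have key : ∀ {l l' : List Int}, l.Perm l' → pvMaxL l ≤ pvMaxL l' := by
    intro l l' hp
    rcases pvFoldl_max_mem l 0 with h0 | hmem
    · rw [pvMaxL, h0]; exact pvMaxL_nonneg l'
    · exact pvLe_foldl_max 0 (hp.mem_iff.mp hmem)
  exact le_antisymm (key h) (key h.symm)

theorem pvPossum_perm {ws ws' : List Int} (h : ws.Perm ws') : pvPossum ws = pvPossum ws' := by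
  exact (h.map _).sum_eq

theorem pvF_perm (t : Nat) {ws ws' : List Int} (h : ws.Perm ws') : pvF t ws = pvF t ws' := by
  induction t generalizing ws ws' with
  | zero => exact pvSumsq_perm h
  | succ t ih =>
      simp only [pvF]
      rw [pvMaxL_perm h]
      exact ih ((h.erase _).cons _)

theorem pvMaxL_mem {ws : List Int} (h : 0 < pvMaxL ws) : pvMaxL ws ∈ ws := by
  rcases pvFoldl_max_mem ws 0 with h0 | hmem
  · rw [pvMaxL, h0] at h; exact absurd h (lt_irrefl 0)
  · exact hmem

theorem pvLe_maxL {w : Int} {ws : List Int} (h : w ∈ ws) : w ≤ pvMaxL ws := by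
  exact pvLe_foldl_max 0 h

theorem pvMaxL_eq {ws : List Int} {u : Int} (hu : 0 < u) (hmem : u ∈ ws) (hle : ∀ w ∈ ws, w ≤ u) :
    pvMaxL ws = u := by
  refine le_antisymm ?_ (pvLe_maxL hmem)
  rcases pvFoldl_max_mem ws 0 with h0 | hm
  · rw [pvMaxL, h0]; exact le_of_lt hu
  · exact hle _ hm

theorem pvPossum_pos_maxL {ws : List Int} (h : 0 < pvPossum ws) : 0 < pvMaxL ws := by
  by_contra hc
  rw [not_lt] at hc
  have : pvPossum ws = 0 := by
    apply List.sum_eq_zero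
    intro x hx
    rcases List.mem_map.mp hx with ⟨w, hw, rfl⟩
    have := pvLe_maxL hw
    omega
  omega

theorem pvSum_le_possum (ws : List Int) : ws.sum ≤ pvPossum ws := by
  induction ws with
  | nil => simp [pvPossum]
  | cons w t ih =>
      simp only [pvPossum, List.map_cons, List.sum_cons, List.sum_cons] at *
      exact add_le_add (le_max_left w 0) ih

theorem pvArgmax_all_le (ws : List Int) (i : Nat) (mt mn : Int) (h : ∀ w ∈ ws, w ≤ mt) :
    pvArgmax ws i mt mn = (mt, mn) := by
  induction ws generalizing i mt mn with
  | nil => rfl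
  | cons w t ih =>
      rw [pvArgmax, if_neg (not_lt.mpr (h w (by simp)))]
      exact ih _ _ _ (fun x hx => h x (by simp [hx]))

theorem pvArgmax_gt (ws : List Int) (i : Nat) (mt mn : Int) (h : mt < ws.foldl max mt) :
    pvArgmax ws i mt mn = (ws.foldl max mt, ((i : Int) + (ws.idxOf (ws.foldl max mt) : Int))) := by
  induction ws generalizing i mt mn with
  | nil => simp at h
  | cons w t ih =>
      simp only [List.foldl_cons] at h ⊢
      by_cases hw : mt < w
      · rw [pvArgmax, if_pos hw]
        rw [max_eq_right (le_of_lt hw)] at h ⊢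
        by_cases hall : ∀ x ∈ t, x ≤ w
        · rw [pvFoldl_max_of_le hall] at h ⊢
          rw [pvArgmax_all_le t (i + 1) w (i : Int) hall]
          simp [List.idxOf_cons_self]
        · have hgt : w < t.foldl max w := by
            rcases not_forall.mp hall with ⟨x, hx⟩
            rcases Classical.not_imp.mp hx with ⟨hxm, hxw⟩
            exact lt_of_lt_of_le (not_le.mp hxw) (pvLe_foldl_max w hxm)
          rw [ih (i + 1) w (i : Int) hgt]
          have hne : (w : Int) ≠ t.foldl max w := ne_of_lt hgt
          rw [List.idxOf_cons_ne t hne]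
          push_cast
          refine Prod.ext rfl ?_
          ring
      · rw [pvArgmax, if_neg hw]
        rw [max_eq_left (not_lt.mp hw)] at h ⊢
        have hne : (w : Int) ≠ t.foldl max mt := ne_of_lt (lt_of_le_of_lt (not_lt.mp hw) h)
        rw [ih (i + 1) mt mn h, List.idxOf_cons_ne t hne]
        push_cast
        refine Prod.ext rfl ?_
        ring

theorem pvSet_idxOf_perm {ws : List Int} {m : Int} (v : Int) (h : m ∈ ws) :
    (ws.set (ws.idxOf m) v).Perm (v :: ws.erase m) := by
  induction ws with
  | nil => simp at h
  | cons w t ih =>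
      by_cases hw : w = m
      · subst hw
        simp [List.idxOf_cons_self, List.erase_cons_head]
      · have hm : m ∈ t := by
          rcases List.mem_cons.mp h with h' | h'
          · exact absurd h'.symm hw
          · exact h'
        rw [List.idxOf_cons_ne t hw, List.erase_cons_tail (by simp [hw])]
        show (w :: t.set (t.idxOf m) v).Perm (v :: w :: t.erase m)
        exact ((ih hm).cons w).trans (List.Perm.swap v w _)

theorem pvStep_perm {ws : List Int} (h : 0 < pvMaxL ws) :
    (pvStep ws).Perm ((pvMaxL ws - 1) :: ws.erase (pvMaxL ws)) := by
  have hm : pvMaxL ws ∈ ws := pvMaxL_mem h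
  have hlt : ws.idxOf (pvMaxL ws) < ws.length := List.idxOf_lt_length_of_mem hm
  have harg : pvArgmax ws 0 0 0 = (pvMaxL ws, ((0 : Int) + (ws.idxOf (pvMaxL ws) : Int))) :=
    pvArgmax_gt ws 0 0 0 h
  have hget : PySem.List.pyGet? ws ((ws.idxOf (pvMaxL ws) : Nat) : Int) = some (pvMaxL ws) := by
    simp [hlt, List.getElem_idxOf]
  simp only [pvStep, harg, zero_add, hget, Int.toNat_natCast]
  exact pvSet_idxOf_perm _ hm

theorem pvPossum_decmax {ws : List Int} (h : 0 < pvMaxL ws) :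
    pvPossum ((pvMaxL ws - 1) :: ws.erase (pvMaxL ws)) = pvPossum ws - 1 := by
  have hm := pvMaxL_mem h
  have hp := pvPossum_perm (List.perm_cons_erase hm)
  simp only [pvPossum, List.map_cons, List.sum_cons] at hp ⊢
  rw [hp, max_eq_left (le_of_lt h), max_eq_left (by omega : (0:Int) ≤ pvMaxL ws - 1)]
  ring

theorem pvFoldl_sq (ws : List Int) (c : Int) :
    ws.foldl (fun a w => a + w ^ 2) c = c + pvSumsq ws := by
  induction ws generalizing c with
  | nil => simp [pvSumsq]
  | cons w t ih =>
      simp only [List.foldl_cons, pvSumsq, List.map_cons, List.sum_cons] at *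
      rw [ih]; ring

theorem pvPossum_append (a b : List Int) : pvPossum (a ++ b) = pvPossum a + pvPossum b := by
  simp [pvPossum]

theorem pvPossum_replicate (k : Nat) (x : Int) (h : 0 ≤ x) :
    pvPossum (List.replicate k x) = (k : Int) * x := by
  simp [pvPossum, List.map_replicate, List.sum_replicate, max_eq_left h]

theorem pvMax?_eq {ws : List Int} (h : 0 < pvMaxL ws) :
    PySem.List.max? ws (fun y => y) = some (pvMaxL ws) := by
  have hm := pvMaxL_mem h
  cases ws with
  | nil => simp at hm
  | cons p t =>
      rw [PySem.List.max?_id_cons]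
      have hrw : pvMaxL (p :: t) = max 0 (t.foldl max p) := by
        simp only [pvMaxL, List.foldl_cons]
        exact pvFoldl_max_init t 0 p
      rw [hrw] at h ⊢
      have hX : 0 < t.foldl max p := by
        rcases max_choice 0 (t.foldl max p) with hc | hc <;> rw [hc] at h
        · exact absurd h (lt_irrefl 0)
        · exact h
      rw [max_eq_right (le_of_lt hX)]

-- A's loop realises the specification pvF
theorem pvALoop_spec (t : Nat) (ws : List Int) (h : (t : Int) < pvPossum ws) :
    pvSumsq (pvALoop t ws) = pvF t ws := by
  induction t generalizing ws with
  | zero => rfl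
  | succ t ih =>
      have h0 : 0 < pvPossum ws := by
        have : (0 : Int) ≤ (t : Int) := Int.natCast_nonneg t
        push_cast at h
        omega
      have hmax : 0 < pvMaxL ws := pvPossum_pos_maxL h0
      have hperm := pvStep_perm hmax
      have hpos : pvPossum (pvStep ws) = pvPossum ws - 1 := by
        rw [pvPossum_perm hperm, pvPossum_decmax hmax]
      calc pvSumsq (pvALoop (t + 1) ws) = pvSumsq (pvALoop t (pvStep ws)) := rfl
        _ = pvF t (pvStep ws) := by
              apply ih
              rw [hpos]
              push_cast at h ⊢
              omega
        _ = pvF t ((pvMaxL ws - 1) :: ws.erase (pvMaxL ws)) := pvF_perm t hperm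
        _ = pvF (t + 1) ws := rfl

-- nonpositive tail is inert
theorem pvF_append_nonpos (t : Nat) (pos rest : List Int) (hrest : ∀ w ∈ rest, w ≤ 0)
    (h : (t : Int) < pvPossum pos) : pvF t (pos ++ rest) = pvF t pos + pvSumsq rest := by
  induction t generalizing pos with
  | zero => exact pvSumsq_append pos rest
  | succ t ih =>
      have h0 : 0 < pvPossum pos := by push_cast at h; omega
      have hmax : 0 < pvMaxL pos := pvPossum_pos_maxL h0
      have hmem : pvMaxL pos ∈ pos := pvMaxL_mem hmax
      have hmaxapp : pvMaxL (pos ++ rest) = pvMaxL pos := by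
        simp only [pvMaxL, List.foldl_append]
        exact pvFoldl_max_of_le (fun w hw => le_trans (hrest w hw) (pvMaxL_nonneg pos))
      have herase : (pos ++ rest).erase (pvMaxL pos) = pos.erase (pvMaxL pos) ++ rest :=
        List.erase_append_left rest hmem
      show pvF t ((pvMaxL (pos ++ rest) - 1) :: (pos ++ rest).erase (pvMaxL (pos ++ rest)))
          = pvF (t + 1) pos + pvSumsq rest
      rw [hmaxapp, herase]
      have hsplit : ((pvMaxL pos - 1) :: (pos.erase (pvMaxL pos) ++ rest))
          = ((pvMaxL pos - 1) :: pos.erase (pvMaxL pos)) ++ rest := rfl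
      rw [hsplit, ih ((pvMaxL pos - 1) :: pos.erase (pvMaxL pos))
        (by rw [pvPossum_decmax hmax]; push_cast at h ⊢; omega)]
      rfl

theorem pvF_level (k t : Nat) (u : Int) (rest : List Int) (hu : 0 < u)
    (hrest : ∀ w ∈ rest, w ≤ u - 1) :
    pvF (k + t) (List.replicate k u ++ rest) = pvF t (List.replicate k (u - 1) ++ rest) := by
  induction k generalizing t rest with
  | zero => simp
  | succ k ih =>
      have hstep : (k + 1) + t = (k + t) + 1 := by omega
      rw [hstep]
      have hcons : List.replicate (k + 1) u ++ rest = u :: (List.replicate k u ++ rest) := rfl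
      rw [hcons]
      have hmax : pvMaxL (u :: (List.replicate k u ++ rest)) = u := by
        apply pvMaxL_eq hu (by simp)
        intro w hw
        rcases List.mem_cons.mp hw with heq | hw
        · exact le_of_eq heq
        · rcases List.mem_append.mp hw with hw | hw
          · exact le_of_eq (List.eq_of_mem_replicate hw)
          · exact le_trans (hrest w hw) (by omega)
      have hunf : pvF ((k + t) + 1) (u :: (List.replicate k u ++ rest))
          = pvF (k + t) ((u - 1) :: (List.replicate k u ++ rest)) := by
        simp only [pvF, hmax, List.erase_cons_head]
      have hrest' : ∀ w ∈ (u - 1) :: rest, w ≤ u - 1 := by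
        intro w hw
        rcases List.mem_cons.mp hw with heq | hw
        · exact le_of_eq heq
        · exact hrest w hw
      rw [hunf, pvF_perm (k + t) (List.perm_middle (l₁ := List.replicate k u) (a := u - 1) (l₂ := rest)).symm,
        ih t ((u - 1) :: rest) hrest']
      exact pvF_perm t (List.perm_middle (l₁ := List.replicate k (u - 1)) (a := u - 1) (l₂ := rest))

theorem pvF_batch (d k t : Nat) (u : Int) (rest : List Int) (hd : (d : Int) ≤ u)
    (hrest : ∀ w ∈ rest, w ≤ u - d) :
    pvF (k * d + t) (List.replicate k u ++ rest) = pvF t (List.replicate k (u - d) ++ rest) := by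
  induction d generalizing u with
  | zero => simp
  | succ d ih =>
      have hu : 0 < u := by push_cast at hd; omega
      have hrest1 : ∀ w ∈ rest, w ≤ u - 1 := by
        intro w hw
        have := hrest w hw
        push_cast at this ⊢
        omega
      have hsplit : k * (d + 1) + t = k + (k * d + t) := by ring
      rw [hsplit, pvF_level k (k * d + t) u rest hu hrest1]
      have hd' : (d : Int) ≤ u - 1 := by push_cast at hd; omega
      have hrest' : ∀ w ∈ rest, w ≤ (u - 1) - d := by
        intro w hw
        have := hrest w hw
        push_cast at this ⊢
        omega
      rw [ih (u - 1) hd' hrest']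
      have : (u - 1) - (d : Int) = u - ((d : Nat) + 1 : Nat) := by push_cast; ring
      rw [this]

-- the last, partial level: r of the k maxima drop once more
theorem pvF_partial (r k : Nat) (u : Int) (rest : List Int) (hrk : r ≤ k) (hu : 0 < u)
    (hrest : ∀ w ∈ rest, w ≤ u - 1) :
    pvF r (List.replicate k u ++ rest)
      = ((k : Int) - (r : Int)) * (u * u) + (r : Int) * ((u - 1) * (u - 1)) + pvSumsq rest := by
  induction r generalizing k rest with
  | zero =>
      simp only [pvF, pvSumsq_append, pvSumsq_replicate]
      push_cast
      ring
  | succ r ih =>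
      obtain ⟨k', rfl⟩ : ∃ k', k = k' + 1 := ⟨k - 1, by omega⟩
      have hcons : List.replicate (k' + 1) u ++ rest = u :: (List.replicate k' u ++ rest) := rfl
      rw [hcons]
      have hmax : pvMaxL (u :: (List.replicate k' u ++ rest)) = u := by
        apply pvMaxL_eq hu (by simp)
        intro w hw
        rcases List.mem_cons.mp hw with heq | hw
        · exact le_of_eq heq
        · rcases List.mem_append.mp hw with hw | hw
          · exact le_of_eq (List.eq_of_mem_replicate hw)
          · exact le_trans (hrest w hw) (by omega)
      have hunf : pvF (r + 1) (u :: (List.replicate k' u ++ rest))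
          = pvF r ((u - 1) :: (List.replicate k' u ++ rest)) := by
        simp only [pvF, hmax, List.erase_cons_head]
      have hrest' : ∀ w ∈ (u - 1) :: rest, w ≤ u - 1 := by
        intro w hw
        rcases List.mem_cons.mp hw with heq | hw
        · exact le_of_eq heq
        · exact hrest w hw
      rw [hunf, pvF_perm r (List.perm_middle (l₁ := List.replicate k' u) (a := u - 1) (l₂ := rest)).symm,
        ih k' ((u - 1) :: rest) (by omega) hrest']
      have hsq : pvSumsq ((u - 1) :: rest) = (u - 1) * (u - 1) + pvSumsq rest := by
        simp only [pvSumsq, List.map_cons, List.sum_cons]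
      rw [hsq]
      push_cast
      ring

theorem pvBLoop_spec (f : Nat) (n base : Int) (pos : List Int) (hf : n.toNat ≤ f)
    (hpos : ∀ w ∈ pos, 0 ≤ w) (h : n < pvPossum pos) :
    pvBLoop f n base pos = base + pvF n.toNat pos := by
  induction f generalizing n pos with
  | zero =>
      have hn0 : n.toNat = 0 := by omega
      rw [hn0]; rfl
  | succ f ih =>
      by_cases hn : n > 0
      · have hps : 0 < pvPossum pos := lt_trans hn h
        have hmax : 0 < pvMaxL pos := pvPossum_pos_maxL hps
        have hmx : PySem.List.max? pos (fun y => y) = some (pvMaxL pos) := pvMax?_eq hmax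
        have hmem : pvMaxL pos ∈ pos := pvMaxL_mem hmax
        simp only [pvBLoop, hmx, if_pos hn]
        set kN := PySem.List.count pos (pvMaxL pos) with hkdef
        set lower := pos.filter (fun w => decide (w < pvMaxL pos)) with hlowdef
        set nxtv := (match PySem.List.max? lower (fun y => y) with | some x => x | none => (0 : Int)) with hnxtdef
        have hnfacts : 0 ≤ nxtv ∧ nxtv < pvMaxL pos ∧ ∀ w ∈ lower, w ≤ nxtv := by
          rcases hc : PySem.List.max? lower (fun y => y) with _ | x
          · have hnil : lower = [] := (PySem.List.max?_eq_none_iff _ _).mp hc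
            rw [hnxtdef]
            simp only [hc]
            exact ⟨le_refl 0, hmax, by simp [hnil]⟩
          · rw [hnxtdef]
            simp only [hc]
            have hxmem : x ∈ lower := PySem.List.max?_mem hc
            have hxlt : x < pvMaxL pos := by simpa using List.of_mem_filter hxmem
            have hx0 : 0 ≤ x := hpos x (List.mem_of_mem_filter hxmem)
            exact ⟨hx0, hxlt, fun w hw => by simpa using PySem.List.max?_isMax hc w hw⟩
        obtain ⟨hn0le, hnlt, hlowle⟩ := hnfacts
        have hk : 0 < kN := by
          rw [hkdef, PySem.List.count_eq]
          exact List.count_pos_iff.mpr hmem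
        have hkI : (0 : Int) < (kN : Int) := by exact_mod_cast hk
        have hfe : pos.filter (fun w => !decide (w < pvMaxL pos)) = List.replicate kN (pvMaxL pos) := by
          have h1 : pos.filter (fun w => !decide (w < pvMaxL pos)) = pos.filter (· == pvMaxL pos) := by
            apply List.filter_congr
            intro w hw
            have hle : w ≤ pvMaxL pos := pvLe_maxL hw
            by_cases hwm : w = pvMaxL pos
            · simp [hwm]
            · have hlt : w < pvMaxL pos := lt_of_le_of_ne hle hwm
              simp [hlt, hwm]
          rw [h1, List.filter_beq, hkdef, PySem.List.count_eq]
        have hperm : pos.Perm (List.replicate kN (pvMaxL pos) ++ lower) := by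
          have hap := List.filter_append_perm (fun w => decide (w < pvMaxL pos)) pos
          rw [hfe] at hap
          exact hap.symm.trans List.perm_append_comm
        have hppos : pvPossum pos = (kN : Int) * pvMaxL pos + pvPossum lower := by
          rw [pvPossum_perm hperm, pvPossum_append, pvPossum_replicate _ _ (le_of_lt hmax)]
        by_cases hb : (kN : Int) * (pvMaxL pos - nxtv) ≤ n
        · rw [if_pos hb]
          have hbatch1 : 1 ≤ (kN : Int) * (pvMaxL pos - nxtv) := by
            have h1 : (1 : Int) ≤ (kN : Int) := hkI
            have h2 : (1 : Int) ≤ pvMaxL pos - nxtv := by omega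
            nlinarith
          have hple : pvPossum (lower ++ List.replicate kN nxtv) = pvPossum lower + (kN : Int) * nxtv := by
            rw [pvPossum_append, pvPossum_replicate _ _ hn0le]
          have hrr : (kN : Int) * (pvMaxL pos - nxtv) = (kN : Int) * pvMaxL pos - (kN : Int) * nxtv := by
            ring
          have hlt' : n - (kN : Int) * (pvMaxL pos - nxtv) < pvPossum (lower ++ List.replicate kN nxtv) := by
            rw [hple]
            linarith [h, hppos]
          have hf' : (n - (kN : Int) * (pvMaxL pos - nxtv)).toNat ≤ f := by omega
          have hpos' : ∀ w ∈ lower ++ List.replicate kN nxtv, 0 ≤ w := by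
            intro w hw
            rcases List.mem_append.mp hw with hw | hw
            · exact hpos w (List.mem_of_mem_filter hw)
            · rw [List.eq_of_mem_replicate hw]; exact hn0le
          rw [ih _ _ hf' hpos' hlt']
          congr 1
          apply Eq.symm
          have e1 : (((pvMaxL pos - nxtv).toNat : Nat) : Int) = pvMaxL pos - nxtv :=
            Int.toNat_of_nonneg (by omega)
          have e2 : (((n - (kN : Int) * (pvMaxL pos - nxtv)).toNat : Nat) : Int)
              = n - (kN : Int) * (pvMaxL pos - nxtv) := Int.toNat_of_nonneg (by omega)
          have hdt : n.toNat
              = kN * (pvMaxL pos - nxtv).toNat + (n - (kN : Int) * (pvMaxL pos - nxtv)).toNat := by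
            apply Int.natCast_inj.mp
            push_cast
            rw [e1, e2, Int.toNat_of_nonneg (le_of_lt hn)]
            ring
          rw [pvF_perm n.toNat hperm, hdt,
            pvF_batch _ _ _ _ _ (by rw [e1]; omega)
              (fun w hw => by rw [e1]; have := hlowle w hw; omega)]
          rw [e1]
          have hsub : pvMaxL pos - (pvMaxL pos - nxtv) = nxtv := by ring
          rw [hsub]
          exact pvF_perm _ List.perm_append_comm
        · rw [if_neg hb]
          rw [not_le] at hb
          have hqr : PySem.Int.floordiv n (kN : Int) * (kN : Int) + PySem.Int.mod n (kN : Int) = n :=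
            PySem.Int.floordiv_mul_add_mod n (kN : Int)
          have hr0 : 0 ≤ PySem.Int.mod n (kN : Int) := PySem.Int.mod_nonneg n hkI
          have hrk : PySem.Int.mod n (kN : Int) < (kN : Int) := PySem.Int.mod_lt n hkI
          have hq0 : 0 ≤ PySem.Int.floordiv n (kN : Int) := by
            by_contra hneg
            rw [not_le] at hneg
            have h1 : PySem.Int.floordiv n (kN : Int) ≤ -1 := by omega
            have h2 : PySem.Int.floordiv n (kN : Int) * (kN : Int) ≤ (-1) * (kN : Int) :=
              mul_le_mul_of_nonneg_right h1 (le_of_lt hkI)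
            linarith
          have hqlt : PySem.Int.floordiv n (kN : Int) < pvMaxL pos - nxtv := by
            by_contra hge
            rw [not_lt] at hge
            have h2 : (pvMaxL pos - nxtv) * (kN : Int) ≤ PySem.Int.floordiv n (kN : Int) * (kN : Int) :=
              mul_le_mul_of_nonneg_right hge (le_of_lt hkI)
            have h3 : (kN : Int) * (pvMaxL pos - nxtv) = (pvMaxL pos - nxtv) * (kN : Int) := mul_comm _ _
            linarith
          have ed : ((PySem.Int.floordiv n (kN : Int)).toNat : Int) = PySem.Int.floordiv n (kN : Int) :=
            Int.toNat_of_nonneg hq0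
          have er : ((PySem.Int.mod n (kN : Int)).toNat : Int) = PySem.Int.mod n (kN : Int) :=
            Int.toNat_of_nonneg hr0
          have hdt : n.toNat
              = kN * (PySem.Int.floordiv n (kN : Int)).toNat + (PySem.Int.mod n (kN : Int)).toNat := by
            apply Int.natCast_inj.mp
            push_cast
            rw [ed, er, Int.toNat_of_nonneg (le_of_lt hn)]
            linarith [hqr]
          rw [pvF_perm n.toNat hperm, hdt,
            pvF_batch _ _ _ _ _ (by rw [ed]; omega)
              (fun w hw => by rw [ed]; have := hlowle w hw; omega)]
          rw [ed]
          rw [pvF_partial _ _ _ _ (by omega) (by omega)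
            (fun w hw => by have := hlowle w hw; omega)]
          rw [er]
          ring
      · simp only [pvBLoop, if_neg hn]
        have hn0 : n.toNat = 0 := by omega
        rw [hn0]
        rfl

-- ===== VERDICT (by name: the statement is the Claim_ definition above) =====
theorem solution_spec : Claim_equal_solution := by
  unfold Claim_equal_solution
  intro n works _
  unfold Spec_solution solution solution_alt
  by_cases hs : works.sum ≤ n
  · rw [if_pos hs, if_pos hs]
  · rw [if_neg hs, if_neg hs]
    rw [not_le] at hs
    set pos := works.filter (fun w => decide (0 < w)) with hposdef
    set rest := works.filter (fun w => decide (w ≤ 0)) with hrestdef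
    have hperm : (pos ++ rest).Perm works := by
      have h1 := List.filter_append_perm (fun w => decide (0 < w)) works
      have h2 : works.filter (fun w => !decide (0 < w)) = rest := by
        rw [hrestdef]
        apply List.filter_congr
        intro w _
        by_cases hw : 0 < w
        · simp [hw, show ¬w ≤ 0 by omega]
        · simp [hw, show w ≤ 0 by omega]
      rw [h2] at h1
      exact h1
    have hrest0 : ∀ w ∈ rest, w ≤ 0 := by
      intro w hw
      simpa using List.of_mem_filter hw
    have hposge : ∀ w ∈ pos, 0 ≤ w := by
      intro w hw
      have h3 := List.of_mem_filter hw
      simp only [decide_eq_true_eq] at h3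
      omega
    rw [pvFoldl_sq]
    by_cases hn : 0 < n
    · have hsp : n < pvPossum works := lt_of_lt_of_le hs (pvSum_le_possum works)
      have hrz : pvPossum rest = 0 := by
        apply List.sum_eq_zero
        intro x hx
        rcases List.mem_map.mp hx with ⟨w, hw, rfl⟩
        have := hrest0 w hw
        omega
      have hpp : pvPossum pos = pvPossum works := by
        have h4 := pvPossum_perm hperm
        rw [pvPossum_append, hrz] at h4
        omega
      have hcast : ((n.toNat : Nat) : Int) = n := Int.toNat_of_nonneg (le_of_lt hn)
      rw [pvALoop_spec n.toNat works (by rw [hcast]; exact hsp)]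
      rw [pvBLoop_spec n.toNat n _ pos (le_refl _) hposge (by omega)]
      rw [pvF_perm n.toNat hperm.symm,
        pvF_append_nonpos n.toNat pos rest hrest0 (by rw [hcast]; omega)]
      ring
    · rw [not_lt] at hn
      have hn0 : n.toNat = 0 := by omega
      rw [hn0]
      show 0 + pvSumsq works = pvSumsq rest + pvSumsq pos
      have h5 := pvSumsq_perm hperm
      rw [pvSumsq_append] at h5
      omega
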